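-- pv_equiv track=rewrite | github.com/Mariia370/Python | homemork_4/task_4_7.py | my_fact
-- ===== SOURCE A (Python) =====
-- def my_fact(n):
--     if n > 0:
--         res = 1
--         for i in range(1, n+1):
--             res = res * i
--             yield res
--     elif n == 0:
--         yield 1
--     else:
--         StopIteration
-- ===== SOURCE B (Python) =====
-- def my_fact(n):
--     # B: recompute each factorial from scratch (no running accumulator); simpler per-term logic, O(n^2)
--     if n == 0:
--         yield 1
--     else:
--         for i in range(1, n + 1):
--             p = 1
--             for k in range(2, i + 1):
--                 p *= k
--             yield p
-- ===== Notes on version B (the rewrite author's own statement) =====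
-- stated objective: alternative
-- what changed: B recomputes each yielded factorial from scratch with an inner product loop instead of maintaining A's running-product accumulator.
import Mathlib
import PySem

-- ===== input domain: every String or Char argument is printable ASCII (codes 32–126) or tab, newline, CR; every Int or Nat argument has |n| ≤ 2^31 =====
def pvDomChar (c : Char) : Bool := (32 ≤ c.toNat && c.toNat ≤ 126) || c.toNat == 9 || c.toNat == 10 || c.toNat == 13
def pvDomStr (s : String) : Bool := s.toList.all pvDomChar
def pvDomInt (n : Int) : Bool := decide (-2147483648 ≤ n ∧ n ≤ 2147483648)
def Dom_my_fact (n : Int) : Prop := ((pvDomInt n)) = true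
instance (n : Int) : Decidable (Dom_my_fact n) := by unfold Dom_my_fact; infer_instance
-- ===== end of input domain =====

-- B recomputes each factorial from scratch with an inner product loop instead of A's running accumulator.

-- ===== PORT A =====
-- A: running product res, yielding res after each multiplication.
def my_fact (n : Int) : List Int :=
  if n > 0 then
    ((PySem.List.pyRange 1 (n + 1) 1).foldl
      (fun (st : Int × List Int) i => (st.1 * i, st.2 ++ [st.1 * i])) (1, [])).2
  else if n = 0 then [1]
  else []

-- ===== PORT B =====
-- B's inner loop: p = 1; for k in range(2, i+1): p *= k
def pvFactOf (i : Int) : Int := (PySem.List.pyRange 2 (i + 1) 1).foldl (· * ·) 1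

def my_fact_alt (n : Int) : List Int :=
  if n = 0 then [1]
  else (PySem.List.pyRange 1 (n + 1) 1).map pvFactOf

-- ===== PRECONDITION & SPEC =====
def Spec_my_fact (n : Int) (out : List Int) : Prop := out = my_fact_alt n
instance (n : Int) (out : List Int) : Decidable (Spec_my_fact n out) := by unfold Spec_my_fact; infer_instance

-- ===== CLAIM (what is proved, stated in full; the proofs are below) =====
def Claim_equal_my_fact : Prop := ∀ (n : Int), Dom_my_fact n → Spec_my_fact n (my_fact n)

-- ===== LEMMAS AND PROOFS =====

theorem pvFactOf_step (j : Nat) :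
    pvFactOf ((j : Int) + 1) = pvFactOf j * ((j : Int) + 1) := by
  cases j with
  | zero => decide
  | succ k =>
    unfold pvFactOf
    rw [show ((((k : Nat) + 1 : Nat) : Int) + 1 + 1) = ((((k : Nat) + 1 : Nat) : Int) + 1) + 1 by push_cast; ring,
        PySem.List.pyRange_one_succ_right (by push_cast; omega)]
    simp [List.foldl_append]

theorem pv_loop_inv (j : Nat) :
    (PySem.List.pyRange 1 (1 + (j : Int)) 1).foldl
      (fun (st : Int × List Int) i => (st.1 * i, st.2 ++ [st.1 * i])) (1, [])
    = (pvFactOf j, (PySem.List.pyRange 1 (1 + (j : Int)) 1).map pvFactOf) := by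
  induction j with
  | zero => decide
  | succ k ih =>
    rw [show (1 + ((k + 1 : Nat) : Int)) = (1 + (k : Int)) + 1 by push_cast; ring,
        PySem.List.pyRange_one_succ_right (by omega)]
    simp [List.foldl_append, List.map_append, ih]
    constructor
    · rw [show (1 + (k : Int)) = (k : Int) + 1 by ring, pvFactOf_step]
    · rw [show (1 + (k : Int)) = (k : Int) + 1 by ring, pvFactOf_step]

-- ===== VERDICT (by name: the statement is the Claim_ definition above) =====
theorem my_fact_spec : Claim_equal_my_fact := by
  intro n _
  unfold Spec_my_fact my_fact my_fact_alt
  by_cases h0 : n = 0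
  · simp [h0]
  · by_cases hp : n > 0
    · have hj : n = ((n.toNat : Nat) : Int) := by omega
      simp only [if_pos hp, if_neg h0]
      rw [show n + 1 = 1 + ((n.toNat : Nat) : Int) by omega, pv_loop_inv]
    · simp only [if_neg hp, if_neg h0]
      rw [PySem.List.pyRange_one_eq_nil (by omega)]
      simp
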